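-- pv_equiv track=rewrite | github.com/rotwatsb/code_kata | src/hackerrank/longestchain.py | can_morph
-- ===== SOURCE A (Python) =====
-- def can_morph(from_word, into_word):
--     if not from_word:
--         return True
--     if not (len(from_word) - len(into_word)) == 1:
--         return False
--     else:
--         seen_diff = False
--         i = 0
--         while i < len(into_word):
--             if from_word[i] != into_word[i]:
--                 if seen_diff:
--                     return False
--                 else:
--                     return from_word[i+1:] == into_word[i:]
--             i += 1
--         return True
-- ===== SOURCE B (Python) =====
-- def can_morph(from_word, into_word):
--     if not from_word:
--         return True
--     for i in range(len(from_word)):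
--         if from_word[:i] + from_word[i+1:] == into_word:
--             return True
--     return False
-- ===== Notes on version B (the rewrite author's own statement) =====
-- stated objective: simpler
-- what changed: Replaced the length check plus greedy first-mismatch scan with an exhaustive try-every-deletion loop that compares each one-character deletion of from_word to into_word.
import Mathlib
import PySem

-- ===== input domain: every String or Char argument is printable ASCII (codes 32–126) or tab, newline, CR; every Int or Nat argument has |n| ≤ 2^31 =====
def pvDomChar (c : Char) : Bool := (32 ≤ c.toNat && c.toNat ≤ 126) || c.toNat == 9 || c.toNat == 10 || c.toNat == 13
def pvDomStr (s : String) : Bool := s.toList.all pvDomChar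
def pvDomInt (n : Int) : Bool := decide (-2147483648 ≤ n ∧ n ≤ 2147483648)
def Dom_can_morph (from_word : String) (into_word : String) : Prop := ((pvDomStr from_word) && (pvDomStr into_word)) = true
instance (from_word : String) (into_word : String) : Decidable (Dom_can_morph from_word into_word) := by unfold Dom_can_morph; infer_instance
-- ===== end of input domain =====

-- B replaces A's greedy first-mismatch scan by trying every one-character deletion; objective: simpler.

-- ===== PORT A =====
-- the while loop of A: i-th step compares from_word[i] with into_word[i]; on first mismatch
-- returns from_word[i+1:] == into_word[i:], else True after the loop
def canMorphLoopA : List Char → List Char → Bool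
  | _, [] => true
  | [], _ :: _ => false  -- unreachable under A's length guard (len f = len t + 1)
  | a :: as, b :: bs => if a ≠ b then decide (as = b :: bs) else canMorphLoopA as bs

def can_morph (from_word : String) (into_word : String) : Bool :=
  let f := from_word.toList
  let t := into_word.toList
  if f.isEmpty then true
  else if ¬ ((f.length : Int) - (t.length : Int) = 1) then false
  else canMorphLoopA f t

-- ===== PORT B =====
def can_morph_alt (from_word : String) (into_word : String) : Bool :=
  let f := from_word.toList
  let t := into_word.toList
  if f.isEmpty then true
  else (List.range f.length).any (fun i => decide (f.take i ++ f.drop (i+1) = t))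

-- ===== PRECONDITION & SPEC =====
def Spec_can_morph (from_word : String) (into_word : String) (out : Bool) : Prop := out = can_morph_alt from_word into_word
instance (from_word : String) (into_word : String) (out : Bool) : Decidable (Spec_can_morph from_word into_word out) := by unfold Spec_can_morph; infer_instance

-- ===== CLAIM (what is proved, stated in full; the proofs are below) =====
def Claim_equal_can_morph : Prop := ∀ (from_word : String) (into_word : String), Dom_can_morph from_word into_word → Spec_can_morph from_word into_word (can_morph from_word into_word)

-- ===== LEMMAS AND PROOFS =====

-- deleting any index i < f.length yields a list one shorter than f
lemma del_length (f : List Char) (i : Nat) (h : i < f.length) :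
    (f.take i ++ f.drop (i+1)).length = f.length - 1 := by
  simp [List.length_append]
  omega

-- if lengths cannot match, no deletion equals t
lemma any_false_of_len (f t : List Char) (h : f.length ≠ t.length + 1) :
    ((List.range f.length).any (fun i => decide (f.take i ++ f.drop (i+1) = t))) = false := by
  simp only [List.any_eq_false, List.mem_range, decide_eq_true_eq]
  intro i hi heq
  have := del_length f i hi
  rw [heq] at this
  omega

-- A's loop accepts (c :: cs, cs): deleting the head char works
lemma loopA_cons_self (cs : List Char) (c : Char) : canMorphLoopA (c :: cs) cs = true := by
  induction cs generalizing c with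
  | nil => simp [canMorphLoopA]
  | cons x xs ih =>
      by_cases h : c = x
      · subst h; simp [canMorphLoopA, ih]
      · simp [canMorphLoopA, h]

-- core equivalence under A's length guard
lemma loopA_eq_any (f t : List Char) (h : f.length = t.length + 1) :
    canMorphLoopA f t
      = ((List.range f.length).any (fun i => decide (f.take i ++ f.drop (i+1) = t))) := by
  induction f generalizing t with
  | nil => simp at h
  | cons a as ih =>
      cases t with
      | nil =>
          have : as = [] := List.length_eq_zero_iff.mp (by simpa using h)
          subst this
          simp [canMorphLoopA, List.range_succ]
      | cons b bs =>
          have hlen : as.length = bs.length + 1 := by simpa using h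
          have hrange : List.range (a :: as).length = 0 :: (List.range as.length).map (· + 1) := by
            simp [List.length_cons, List.range_succ_eq_map]
          rw [hrange]
          simp only [List.any_cons, List.any_map]
          have hinner :
              ((List.range as.length).any
                ((fun i => decide ((a :: as).take i ++ (a :: as).drop (i+1) = b :: bs)) ∘ (· + 1)))
              = ((List.range as.length).any
                (fun i => decide (a = b) && decide (as.take i ++ as.drop (i+1) = bs))) := by
            refine List.any_congr rfl ?_
            intro i
            simp [Function.comp, List.take_succ_cons, List.drop_succ_cons]
          rw [hinner]
          by_cases hab : a = b
          · by_cases hcons : as = b :: bs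
            · simp [canMorphLoopA, hab, hcons, loopA_cons_self]
            · simp [canMorphLoopA, hab, hcons, ih bs hlen]
          · -- first mismatch: A returns decide (as = b :: bs)
            simp [canMorphLoopA, hab]

-- ===== VERDICT (by name: the statement is the Claim_ definition above) =====
theorem can_morph_spec : Claim_equal_can_morph := by
  intro f t _
  unfold Spec_can_morph can_morph can_morph_alt
  set fl := f.toList
  set tl := t.toList
  by_cases he : fl.isEmpty
  · simp [he]
  · simp only [he]
    by_cases hlen : fl.length = tl.length + 1
    · have : ((fl.length : Int) - (tl.length : Int) = 1) := by omega
      simp [this, loopA_eq_any fl tl hlen]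
    · have : ¬ ((fl.length : Int) - (tl.length : Int) = 1) := by omega
      simp [this, any_false_of_len fl tl hlen]
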